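-- pv_equiv track=rewrite | github.com/tinutjoy/flashcard-demo | preprocessing/text_preprocessor.py | prepare_question_generation_format
-- ===== SOURCE A (Python) =====
-- from typing import List
-- from typing import Dict
-- from typing import Any
-- from typing import Union
--
-- def prepare_question_generation_format(sentences: List[str],
--                                        answers: List[List[str]]) -> List[Dict[str, Union[str, Any]]]:
--     """
--     Prepare text required by the model to generate questions.
--     :param sentences: List of sentences.
--     :param answers: List of text in the required format.
--     :return: Returns the text in the required format.
--     """
--     inputs = []
--     for answer_idx, answer in enumerate(answers):
--         if not answer:
--             continue
--         for answer_text in answer: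
--             sentence = sentences[answer_idx]
--             sentences_copy = sentences[:]
--             answer_text = answer_text.strip().replace('<pad>', '').strip()
--             ans_start_idx = sentence.index(answer_text)
--             sentence = f"{sentence[:ans_start_idx]} <hl> {answer_text} <hl> " \
--                        f"{sentence[ans_start_idx + len(answer_text):]}"
--             sentences_copy[answer_idx] = sentence
--             source_text = " ".join(sentences_copy)
--             source_text = f"generate question: {source_text} </s>"
--             inputs.append({"answer": answer_text, "source_text": source_text})
--     return inputs
-- ===== SOURCE B (Python) =====
-- from typing import List
-- from typing import Dict
-- from typing import Any
-- from typing import Union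
--
--
-- def prepare_question_generation_format(sentences: List[str],
--                                        answers: List[List[str]]) -> List[Dict[str, Union[str, Any]]]:
--     """Same output as A, but the joined context around each sentence is
--     precomputed once (prefix/suffix joins) and spliced per answer, instead of
--     copying and re-joining the whole sentence list for every answer."""
--     n = len(sentences)
--     # pre[i] = " ".join(sentences[:i])
--     pre = [""]
--     for k, s in enumerate(sentences):
--         pre.append(s if k == 0 else pre[k] + " " + s)
--     # suf[i] = " ".join(sentences[i:]); built over the reversed list
--     rsuf = [""]
--     for k, s in enumerate(reversed(sentences)):
--         rsuf.append(s if k == 0 else s + " " + rsuf[k])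
--     suf = rsuf[::-1]
--     out = []
--     for i, ans in enumerate(answers):
--         for t in ans:
--             a = t.strip().replace('<pad>', '').strip()
--             s = sentences[i]
--             j = s.index(a)
--             mod = f"{s[:j]} <hl> {a} <hl> {s[j + len(a):]}"
--             left = pre[i] + " " if i > 0 else ""
--             right = " " + suf[i + 1] if i + 1 < n else ""
--             out.append({"answer": a,
--                         "source_text": f"generate question: {left}{mod}{right} </s>"})
--     return out
-- ===== Notes on version B (the rewrite author's own statement) =====
-- stated objective: alternative
-- what changed: Instead of copying the whole sentence list and re-joining it for every answer, B precomputes prefix and suffix joins of the sentences once and splices the highlighted sentence between them per answer.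
import Mathlib
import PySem

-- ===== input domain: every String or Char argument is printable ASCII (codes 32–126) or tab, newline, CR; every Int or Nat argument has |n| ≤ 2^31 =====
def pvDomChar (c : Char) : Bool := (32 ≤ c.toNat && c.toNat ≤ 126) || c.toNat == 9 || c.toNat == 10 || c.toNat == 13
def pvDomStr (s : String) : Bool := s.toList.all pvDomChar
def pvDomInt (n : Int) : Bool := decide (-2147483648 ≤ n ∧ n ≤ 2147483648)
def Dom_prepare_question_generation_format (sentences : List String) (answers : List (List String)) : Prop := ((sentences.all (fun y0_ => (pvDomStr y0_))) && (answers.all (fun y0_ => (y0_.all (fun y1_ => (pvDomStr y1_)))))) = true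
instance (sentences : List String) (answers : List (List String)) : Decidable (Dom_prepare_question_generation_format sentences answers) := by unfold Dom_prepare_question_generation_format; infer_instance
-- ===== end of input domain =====

-- B precomputes the prefix/suffix joins of the sentence list once and splices the highlighted
-- sentence between them per answer, instead of copying and re-joining the list for every answer.

-- shared helper: answer_text.strip().replace('<pad>', '').strip()  (identical expression in both Pythons)
def pqClean (t : String) : String :=
  PySem.Str.strip (PySem.Str.replace (PySem.Str.strip t) "<pad>" "")

-- ===== PORT A =====
-- body of A's inner loop (one appended dict), kept step for step
def pqItemA (sentences : List String) (answer_idx : Int) (answer_text : String) : List (String × String) :=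
  let sentence := PySem.List.pyGetD sentences answer_idx ""      -- sentences[answer_idx] (in range inside Pre_)
  let a := pqClean answer_text
  let ans_start_idx := PySem.Str.find sentence a                 -- sentence.index(…) (found inside Pre_)
  let sentence' := PySem.Str.slice sentence none (some ans_start_idx) ++ " <hl> " ++ a ++ " <hl> " ++
                   PySem.Str.slice sentence (some (ans_start_idx + PySem.Str.len a)) none
  let sentences_copy := sentences.set answer_idx.toNat sentence' -- sentences_copy[answer_idx] = sentence (0 ≤ answer_idx from enumerate)
  let source_text := PySem.Str.join " " sentences_copy
  [("answer", a), ("source_text", "generate question: " ++ source_text ++ " </s>")]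

def prepare_question_generation_format (sentences : List String) (answers : List (List String)) : List (List (String × String)) :=
  (PySem.List.enumerate answers).foldl (fun inputs p =>
    if p.2 = [] then inputs                                      -- if not answer: continue
    else p.2.foldl (fun inputs answer_text => inputs ++ [pqItemA sentences p.1 answer_text]) inputs) []

-- ===== PORT B =====
-- pre[i] = " ".join(sentences[:i]), built by one forward pass
def pqPrefixes (sentences : List String) : List String :=
  (PySem.List.enumerate sentences).foldl (fun pre p =>
    pre ++ [if p.1 == 0 then p.2 else PySem.List.pyGetD pre p.1 "" ++ " " ++ p.2]) [""]

-- suf[i] = " ".join(sentences[i:]): rsuf built over reversed(sentences), then rsuf[::-1]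
-- (s[::-1] is reverse: PySem.List.slice?_none_none_neg_one)
def pqSuffixes (sentences : List String) : List String :=
  ((PySem.List.enumerate sentences.reverse).foldl (fun rsuf p =>
    rsuf ++ [if p.1 == 0 then p.2 else p.2 ++ " " ++ PySem.List.pyGetD rsuf p.1 ""]) [""]).reverse

-- body of B's inner loop
def pqItemB (sentences : List String) (pre suf : List String) (n : Int) (i : Int) (t : String) : List (String × String) :=
  let a := pqClean t
  let s := PySem.List.pyGetD sentences i ""
  let j := PySem.Str.find s a
  let mod := PySem.Str.slice s none (some j) ++ " <hl> " ++ a ++ " <hl> " ++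
             PySem.Str.slice s (some (j + PySem.Str.len a)) none
  let left := if 0 < i then PySem.List.pyGetD pre i "" ++ " " else ""
  let right := if i + 1 < n then " " ++ PySem.List.pyGetD suf (i + 1) "" else ""
  [("answer", a), ("source_text", "generate question: " ++ left ++ mod ++ right ++ " </s>")]

def prepare_question_generation_format_alt (sentences : List String) (answers : List (List String)) : List (List (String × String)) :=
  let n : Int := sentences.length
  let pre := pqPrefixes sentences
  let suf := pqSuffixes sentences
  (PySem.List.enumerate answers).foldl (fun out p =>
    p.2.foldl (fun out t => out ++ [pqItemB sentences pre suf n p.1 t]) out) []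

-- ===== PRECONDITION & SPEC =====
-- Pre_ excludes exactly the inputs where A raises: an answer index with a nonempty answer list
-- beyond the sentence list (IndexError), or a cleaned answer not found in its sentence (ValueError).
def Pre_prepare_question_generation_format (sentences : List String) (answers : List (List String)) : Prop :=
  ∀ p ∈ PySem.List.enumerate answers, ∀ t ∈ p.2,
    p.1 < (sentences.length : Int) ∧
    PySem.Str.isIn (pqClean t) (PySem.List.pyGetD sentences p.1 "") = true
instance (sentences : List String) (answers : List (List String)) : Decidable (Pre_prepare_question_generation_format sentences answers) := by unfold Pre_prepare_question_generation_format; infer_instance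

def pvWitness_prepare_question_generation_format : List String × List (List String) :=
  (["a b", "c d"], [["b"], ["c d", " c <pad> "]])

def Spec_prepare_question_generation_format (sentences : List String) (answers : List (List String)) (out : List (List (String × String))) : Prop := out = prepare_question_generation_format_alt sentences answers
instance (sentences : List String) (answers : List (List String)) (out : List (List (String × String))) : Decidable (Spec_prepare_question_generation_format sentences answers out) := by unfold Spec_prepare_question_generation_format; infer_instance

-- ===== CLAIM (what is proved, stated in full; the proofs are below) =====
def Claim_equal_prepare_question_generation_format : Prop := ∀ (sentences : List String) (answers : List (List String)), Dom_prepare_question_generation_format sentences answers → Pre_prepare_question_generation_format sentences answers → Spec_prepare_question_generation_format sentences answers (prepare_question_generation_format sentences answers)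


-- ===== LEMMAS AND PROOFS =====

theorem pq_enumerate_append {α : Type} (xs ys : List α) (s : Int) :
    PySem.List.enumerate (xs ++ ys) s = PySem.List.enumerate xs s ++ PySem.List.enumerate ys (s + xs.length) := by
  induction xs generalizing s with
  | nil => simp [PySem.List.enumerate_nil]
  | cons x xs ih => simp [PySem.List.enumerate_cons, ih]; ring_nf

theorem pq_mem_enumerate_nonneg {α : Type} (xs : List α) :
    ∀ (s : Int) (p : Int × α), p ∈ PySem.List.enumerate xs s → s ≤ p.1 := by
  induction xs with
  | nil => intro s p h; simp [PySem.List.enumerate_nil] at h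
  | cons x xs ih =>
    intro s p h
    rw [PySem.List.enumerate_cons, List.mem_cons] at h
    rcases h with h | h
    · subst h; simp
    · have := ih (s + 1) p h; omega

-- Chars-level: join of a nonempty tail
theorem pq_chars_join_cons (sep x : List Char) (as : List (List Char)) (h : as ≠ []) :
    PySem.Chars.join sep (x :: as) = x ++ sep ++ PySem.Chars.join sep as := by
  cases as with
  | nil => exact absurd rfl h
  | cons a as => exact PySem.Chars.join_cons_cons sep x a as

-- Chars-level: join split around one element
theorem pq_chars_join_split (sep : List Char) (as : List (List Char)) (b : List Char) (cs : List (List Char)) :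
    PySem.Chars.join sep (as ++ b :: cs) =
      (if as = [] then [] else PySem.Chars.join sep as ++ sep) ++ b ++
      (if cs = [] then [] else sep ++ PySem.Chars.join sep cs) := by
  induction as with
  | nil =>
    cases cs with
    | nil => simp [PySem.Chars.join_singleton]
    | cons c cs => simp [PySem.Chars.join_cons_cons]
  | cons a as ih =>
    have hne : as ++ b :: cs ≠ [] := by simp
    rw [List.cons_append, pq_chars_join_cons sep a _ hne, ih]
    cases as with
    | nil => simp [PySem.Chars.join_singleton]
    | cons a' as' => rw [pq_chars_join_cons sep a (a' :: as') (by simp)]; simp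

-- String-level join split
theorem pq_join_split (as : List String) (b : String) (cs : List String) :
    PySem.Str.join " " (as ++ b :: cs) =
      (if as = [] then "" else PySem.Str.join " " as ++ " ") ++ b ++
      (if cs = [] then "" else " " ++ PySem.Str.join " " cs) := by
  rw [← String.toList_inj]
  simp only [String.toList_append, PySem.Str.toList_join, List.map_append, List.map_cons]
  rw [pq_chars_join_split]
  by_cases h1 : as = [] <;> by_cases h2 : cs = [] <;>
    simp [h1, h2, List.map_eq_nil_iff, PySem.Str.toList_join]

theorem pq_join_append_singleton (xs : List String) (x : String) :
    PySem.Str.join " " (xs ++ [x]) = if xs = [] then x else PySem.Str.join " " xs ++ " " ++ x := by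
  rw [pq_join_split xs x []]
  by_cases hx : xs = [] <;> simp [hx, ← String.toList_inj, String.toList_append, PySem.Str.toList_join]

theorem pq_join_cons_str (x : String) (xs : List String) :
    PySem.Str.join " " (x :: xs) = if xs = [] then x else x ++ " " ++ PySem.Str.join " " xs := by
  rw [show x :: xs = [] ++ x :: xs from rfl, pq_join_split [] x xs]
  by_cases hx : xs = [] <;> simp [hx, ← String.toList_inj, String.toList_append, PySem.Str.toList_join]

-- join of a list with one element replaced, in spliced form
theorem pq_join_set (xs : List String) (k : Nat) (m : String) (hk : k < xs.length) :
    PySem.Str.join " " (xs.set k m) =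
      (if 0 < k then PySem.Str.join " " (xs.take k) ++ " " else "") ++ m ++
      (if k + 1 < xs.length then " " ++ PySem.Str.join " " (xs.drop (k + 1)) else "") := by
  rw [List.set_eq_take_append_cons_drop, if_pos hk, pq_join_split]
  have h1 : (xs.take k = []) ↔ ¬ (0 < k) := by
    rw [List.take_eq_nil_iff]
    constructor
    · rintro (h | h)
      · omega
      · rw [h] at hk; simp at hk
    · intro h; left; omega
  have h2 : (xs.drop (k + 1) = []) ↔ ¬ (k + 1 < xs.length) := by
    rw [List.drop_eq_nil_iff]; omega
  by_cases hp : 0 < k <;> by_cases hq : k + 1 < xs.length <;> simp [h1, h2, hp, hq]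

-- characterization of pqPrefixes
theorem pq_prefixes_eq (xs : List String) :
    pqPrefixes xs = (List.range (xs.length + 1)).map (fun i => PySem.Str.join " " (xs.take i)) := by
  induction xs using List.reverseRecOn with
  | nil => simp [pqPrefixes, PySem.List.enumerate_nil]; decide
  | append_singleton xs x ih =>
    unfold pqPrefixes at *
    rw [pq_enumerate_append, List.foldl_append, ih]
    simp only [PySem.List.enumerate_cons, PySem.List.enumerate_nil, List.foldl_cons,
      List.foldl_nil, zero_add]
    have hlen : ((List.range (xs.length + 1)).map
        (fun i => PySem.Str.join " " (xs.take i))).length = xs.length + 1 := by simp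
    have hget : PySem.List.pyGetD ((List.range (xs.length + 1)).map
        (fun i => PySem.Str.join " " (xs.take i))) ((xs.length : Nat) : Int) "" =
        PySem.Str.join " " xs := by
      rw [PySem.List.pyGetD_eq_getElem _ _ (by omega)
        (by rw [hlen]; exact_mod_cast Nat.lt_succ_self _)]
      simp
    rw [hget, List.length_append, List.length_cons, List.length_nil]
    conv_rhs => rw [List.range_succ]
    rw [List.map_append]
    congr 1
    · apply List.map_congr_left; intro i hi
      simp only [List.mem_range] at hi
      rw [List.take_append_of_le_length (by omega)]
    · simp only [List.map_cons, List.map_nil]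
      rw [List.take_of_length_le (by simp), pq_join_append_singleton]
      by_cases hx : xs = []
      · simp [hx]
      · have hx' : xs.length ≠ 0 := by simpa [List.length_eq_zero_iff] using hx
        have h1 : (((xs.length : Nat) : Int) == 0) = false := by
          simp [Nat.cast_eq_zero, hx']
        rw [h1]; simp [hx]

-- characterization of the rsuf loop of pqSuffixes
theorem pq_rsuf_eq (ys : List String) :
    (PySem.List.enumerate ys).foldl (fun rsuf p =>
      rsuf ++ [if p.1 == 0 then p.2 else p.2 ++ " " ++ PySem.List.pyGetD rsuf p.1 ""]) [""] =
    (List.range (ys.length + 1)).map (fun j => PySem.Str.join " " ((ys.take j).reverse)) := by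
  induction ys using List.reverseRecOn with
  | nil => simp [PySem.List.enumerate_nil]; decide
  | append_singleton ys y ih =>
    rw [pq_enumerate_append, List.foldl_append, ih]
    simp only [PySem.List.enumerate_cons, PySem.List.enumerate_nil, List.foldl_cons,
      List.foldl_nil, zero_add]
    have hlen : ((List.range (ys.length + 1)).map
        (fun j => PySem.Str.join " " ((ys.take j).reverse))).length = ys.length + 1 := by simp
    have hget : PySem.List.pyGetD ((List.range (ys.length + 1)).map
        (fun j => PySem.Str.join " " ((ys.take j).reverse))) ((ys.length : Nat) : Int) "" =
        PySem.Str.join " " ys.reverse := by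
      rw [PySem.List.pyGetD_eq_getElem _ _ (by omega)
        (by rw [hlen]; exact_mod_cast Nat.lt_succ_self _)]
      simp
    rw [hget, List.length_append, List.length_cons, List.length_nil]
    conv_rhs => rw [List.range_succ]
    rw [List.map_append]
    congr 1
    · apply List.map_congr_left; intro i hi
      simp only [List.mem_range] at hi
      rw [List.take_append_of_le_length (by omega)]
    · simp only [List.map_cons, List.map_nil]
      rw [List.take_of_length_le (by simp)]
      have hrev : ((ys ++ [y]).reverse : List String) = y :: ys.reverse := by simp
      rw [hrev, pq_join_cons_str]
      by_cases hx : ys = []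
      · simp [hx]
      · have hx' : ys.length ≠ 0 := by simpa [List.length_eq_zero_iff] using hx
        have h1 : (((ys.length : Nat) : Int) == 0) = false := by
          simp [Nat.cast_eq_zero, hx']
        rw [h1, if_neg (by simp [hx])]
        simp [hx]

theorem pq_suffixes_eq (xs : List String) :
    pqSuffixes xs = ((List.range (xs.length + 1)).map
      (fun j => PySem.Str.join " " ((xs.reverse.take j).reverse))).reverse := by
  unfold pqSuffixes
  rw [pq_rsuf_eq xs.reverse, List.length_reverse]

theorem pq_prefixes_get (xs : List String) (k : Nat) (hk : k ≤ xs.length) :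
    PySem.List.pyGetD (pqPrefixes xs) (k : Int) "" = PySem.Str.join " " (xs.take k) := by
  rw [pq_prefixes_eq]
  rw [PySem.List.pyGetD_eq_getElem _ _ (by omega)
    (by simp only [List.length_map, List.length_range]; exact_mod_cast Nat.lt_succ_of_le hk)]
  simp

theorem pq_suffixes_get (xs : List String) (k : Nat) (hk : k ≤ xs.length) :
    PySem.List.pyGetD (pqSuffixes xs) (k : Int) "" = PySem.Str.join " " (xs.drop k) := by
  rw [pq_suffixes_eq]
  rw [PySem.List.pyGetD_eq_getElem _ _ (by omega)
    (by simp only [List.length_reverse, List.length_map, List.length_range]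
        exact_mod_cast Nat.lt_succ_of_le hk)]
  rw [List.getElem_reverse]
  simp only [Int.toNat_natCast, List.length_map, List.length_range, List.getElem_map,
    List.getElem_range]
  congr 1
  rw [List.take_reverse, List.reverse_reverse]
  congr 1
  omega

-- A's nested loop (with the `continue` on an empty answer list), as a flatMap
theorem pq_nested_foldl {α β γ : Type} (f : α → β → γ) (l : List (α × List β)) (init : List γ) :
    l.foldl (fun acc p => if p.2 = [] then acc
      else p.2.foldl (fun acc t => acc ++ [f p.1 t]) acc) init =
    init ++ l.flatMap (fun p => p.2.map (f p.1)) := by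
  induction l generalizing init with
  | nil => simp
  | cons p l ih =>
    rw [List.foldl_cons, List.flatMap_cons]
    by_cases h : p.2 = []
    · rw [if_pos h, ih, h]; simp
    · rw [if_neg h, PySem.List.foldl_append_singleton_eq_map, ih, List.append_assoc]

-- B's nested loop, as a flatMap
theorem pq_nested_foldl' {α β γ : Type} (f : α → β → γ) (l : List (α × List β)) (init : List γ) :
    l.foldl (fun acc p => p.2.foldl (fun acc t => acc ++ [f p.1 t]) acc) init =
    init ++ l.flatMap (fun p => p.2.map (f p.1)) := by
  induction l generalizing init with
  | nil => simp
  | cons p l ih =>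
    rw [List.foldl_cons, List.flatMap_cons,
      PySem.List.foldl_append_singleton_eq_map, ih, List.append_assoc]

-- the per-item equality: splicing the precomputed joins equals copy-and-rejoin
set_option maxHeartbeats 1000000 in
theorem pq_item_eq (sentences : List String) (i : Int) (t : String)
    (h0 : 0 ≤ i) (h1 : i < (sentences.length : Int)) :
    pqItemA sentences i t =
      pqItemB sentences (pqPrefixes sentences) (pqSuffixes sentences) (sentences.length : Int) i t := by
  obtain ⟨k, rfl⟩ : ∃ k : Nat, i = (k : Int) := ⟨i.toNat, (Int.toNat_of_nonneg h0).symm⟩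
  have hk : k < sentences.length := by exact_mod_cast h1
  simp only [pqItemA, pqItemB, Int.toNat_natCast]
  rw [pq_prefixes_get sentences k (Nat.le_of_lt hk)]
  rw [show ((k : Int) + 1) = (((k + 1 : Nat) : Nat) : Int) by push_cast; ring]
  rw [pq_suffixes_get sentences (k + 1) (by omega)]
  rw [pq_join_set sentences k _ hk]
  simp only [Nat.cast_pos, Nat.cast_lt, String.append_assoc]

-- ===== VERDICT (by name: the statement is the Claim_ definition above) =====
set_option maxHeartbeats 1000000 in
theorem prepare_question_generation_format_spec : Claim_equal_prepare_question_generation_format := by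
  intro sentences answers _hdom hpre
  unfold Pre_prepare_question_generation_format at hpre
  unfold Spec_prepare_question_generation_format
  simp only [prepare_question_generation_format, prepare_question_generation_format_alt]
  rw [pq_nested_foldl (fun a t => pqItemA sentences a t) (PySem.List.enumerate answers) [],
    pq_nested_foldl' (fun a t => pqItemB sentences (pqPrefixes sentences) (pqSuffixes sentences)
      (sentences.length : Int) a t) (PySem.List.enumerate answers) []]
  simp only [List.nil_append, List.flatMap_def]
  congr 1
  apply List.map_congr_left
  intro p hp
  apply List.map_congr_left
  intro t ht
  exact pq_item_eq sentences p.1 t (pq_mem_enumerate_nonneg answers 0 p hp) (hpre p hp t ht).1
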